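-- pv_equiv track=rewrite | github.com/katanukisatoshi/cells-detector | apps/_old/line_filter.py | remove_lines_with_large_gap_right
-- ===== SOURCE A (Python) =====
-- def remove_lines_with_large_gap_right(vertical_lines, gap_threshold=30):
--     right_lines = vertical_lines[-6:]
--     filtered_right_lines = []
--     for i in range(len(right_lines) - 1):
--         if (right_lines[i+1] - right_lines[i]) <= gap_threshold:
--             filtered_right_lines.append(right_lines[i])
--             filtered_right_lines.append(right_lines[i+1])
--     filtered_right_lines = list(set(filtered_right_lines))  # Remove duplicates
--     filtered_right_lines.sort()  # Ensure the lines are sorted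
--     return filtered_right_lines
-- ===== SOURCE B (Python) =====
-- def remove_lines_with_large_gap_right(vertical_lines, gap_threshold=30):
--     # Segment the last 6 lines into maximal runs of small adjacent gaps;
--     # every element of a run of length > 1 is kept, singleton runs are dropped.
--     kept = set()
--     run = []
--     for x in vertical_lines[-6:]:
--         if run and x - run[-1] <= gap_threshold:
--             run.append(x)
--         else:
--             if len(run) > 1:
--                 kept.update(run)
--             run = [x]
--     if len(run) > 1:
--         kept.update(run)
--     return sorted(kept)
-- ===== Notes on version B (the rewrite author's own statement) =====
-- stated objective: alternative
-- what changed: B replaces A's scan over adjacent index pairs (appending both endpoints per small gap, then dedup+sort) by a run-segmentation algorithm: it streams the last 6 values, grouping them into maximal runs whose internal gaps are <= threshold, flushes every run of length > 1 into the kept set and drops singleton runs; correct because an element has an adjacent small gap exactly when it lies in a run of length > 1.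
import Mathlib
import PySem

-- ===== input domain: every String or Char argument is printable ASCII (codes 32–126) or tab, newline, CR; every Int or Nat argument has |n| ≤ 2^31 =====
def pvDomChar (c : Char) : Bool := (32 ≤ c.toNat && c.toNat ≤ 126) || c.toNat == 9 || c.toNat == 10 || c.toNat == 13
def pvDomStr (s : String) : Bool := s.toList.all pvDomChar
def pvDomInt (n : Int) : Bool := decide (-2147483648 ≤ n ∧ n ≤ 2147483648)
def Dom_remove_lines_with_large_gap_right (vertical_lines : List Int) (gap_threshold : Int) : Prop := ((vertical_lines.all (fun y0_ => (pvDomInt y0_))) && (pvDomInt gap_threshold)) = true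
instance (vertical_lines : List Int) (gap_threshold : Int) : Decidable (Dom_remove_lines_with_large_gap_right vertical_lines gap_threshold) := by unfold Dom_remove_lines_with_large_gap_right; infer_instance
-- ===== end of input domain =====

-- B replaces A's adjacent-pair scan by run segmentation: maximal runs of small gaps are
-- collected and runs of length > 1 flushed into the kept set (objective: alternative, same cost).

-- ===== PORT A =====
def remove_lines_with_large_gap_right (vertical_lines : List Int) (gap_threshold : Int) : List Int :=
  let right_lines := PySem.List.slice vertical_lines (some (-6)) none
  let filtered_right_lines := (PySem.List.pyRange 0 ((right_lines.length : Int) - 1) 1).foldl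
    (fun acc i =>
      if PySem.List.pyGetD right_lines (i + 1) 0 - PySem.List.pyGetD right_lines i 0 ≤ gap_threshold then
        (acc ++ [PySem.List.pyGetD right_lines i 0]) ++ [PySem.List.pyGetD right_lines (i + 1) 0]
      else acc) []
  PySem.List.sorted (PySem.Set.ofList filtered_right_lines) (fun x => x) false

-- ===== PORT B =====
def remove_lines_with_large_gap_right_alt (vertical_lines : List Int) (gap_threshold : Int) : List Int :=
  let st := (PySem.List.slice vertical_lines (some (-6)) none).foldl
    (fun (p : PySem.Set Int × List Int) x =>
      if p.2 ≠ [] ∧ x - PySem.List.pyGetD p.2 (-1) 0 ≤ gap_threshold then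
        (p.1, p.2 ++ [x])
      else
        ((if 1 < p.2.length then p.2.foldl PySem.Set.add p.1 else p.1), [x]))
    (PySem.Set.empty, [])
  let kept := if 1 < st.2.length then st.2.foldl PySem.Set.add st.1 else st.1
  PySem.List.sorted kept (fun x => x) false

-- ===== PRECONDITION & SPEC =====
def Spec_remove_lines_with_large_gap_right (vertical_lines : List Int) (gap_threshold : Int) (out : List Int) : Prop := out = remove_lines_with_large_gap_right_alt vertical_lines gap_threshold
instance (vertical_lines : List Int) (gap_threshold : Int) (out : List Int) : Decidable (Spec_remove_lines_with_large_gap_right vertical_lines gap_threshold out) := by unfold Spec_remove_lines_with_large_gap_right; infer_instance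

-- ===== CLAIM =====
def Claim_equal_remove_lines_with_large_gap_right : Prop := ∀ (vertical_lines : List Int) (gap_threshold : Int), Dom_remove_lines_with_large_gap_right vertical_lines gap_threshold → Spec_remove_lines_with_large_gap_right vertical_lines gap_threshold (remove_lines_with_large_gap_right vertical_lines gap_threshold)

-- ===== LEMMAS AND PROOFS =====

-- x lies in some adjacent pair of l whose gap is ≤ g
def pairMem (g x : Int) : List Int → Prop
  | a :: b :: t => (b - a ≤ g ∧ (x = a ∨ x = b)) ∨ pairMem g x (b :: t)
  | _ => False

-- all adjacent gaps of l are ≤ g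
def chainLe (g : Int) : List Int → Prop
  | a :: b :: t => b - a ≤ g ∧ chainLe g (b :: t)
  | _ => True

lemma set_add_nodup (s : PySem.Set Int) (x : Int) (h : List.Nodup s) : List.Nodup (s.add x) := by
  unfold PySem.Set.add; split
  · exact h
  · rename_i hx
    refine List.Nodup.append h (List.nodup_singleton x) ?_
    intro y hy hz
    simp only [List.mem_singleton] at hz
    subst hz
    exact hx (by simpa [PySem.Set.contains] using hy)

lemma mem_foldl_add (l : List Int) (s : PySem.Set Int) (x : Int) :
    x ∈ l.foldl PySem.Set.add s ↔ x ∈ s ∨ x ∈ l := by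
  induction l generalizing s with
  | nil => simp
  | cons hd tl ih => simp [ih, PySem.Set.mem_add]; tauto

lemma nodup_foldl_add (l : List Int) (s : PySem.Set Int) (hs : List.Nodup s) :
    List.Nodup (l.foldl PySem.Set.add s) := by
  induction l generalizing s with
  | nil => simpa
  | cons hd tl ih => exact ih _ (set_add_nodup _ _ hs)

lemma chain_pairMem (g x : Int) (l : List Int) (h : chainLe g l) :
    pairMem g x l ↔ 1 < l.length ∧ x ∈ l := by
  induction l with
  | nil => simp [pairMem]
  | cons a t ih =>
    cases t with
    | nil => simp [pairMem]
    | cons b t' =>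
      obtain ⟨hab, hc⟩ := h
      rw [pairMem, ih hc]
      cases t' with
      | nil => simp [hab]
      | cons c t'' => simp [hab]; tauto

lemma chain_append (g y : Int) (l : List Int) (h : chainLe g l)
    (hy : l = [] ∨ y - l.getLastD 0 ≤ g) : chainLe g (l ++ [y]) := by
  induction l with
  | nil => simp [chainLe]
  | cons a t ih =>
    cases t with
    | nil =>
      rcases hy with h' | h'
      · cases h'
      · simpa [chainLe] using h'
    | cons b t' =>
      obtain ⟨hab, hc⟩ := h
      refine ⟨hab, ih hc ?_⟩
      rcases hy with h' | h'
      · cases h'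
      · right; simpa using h'

lemma pairMem_append (g x y : Int) (u v : List Int) :
    pairMem g x (u ++ y :: v) ↔
      pairMem g x u ∨ (u ≠ [] ∧ y - u.getLastD 0 ≤ g ∧ (x = u.getLastD 0 ∨ x = y))
        ∨ pairMem g x (y :: v) := by
  induction u with
  | nil => simp [pairMem]
  | cons a t ih =>
    cases t with
    | nil => simp [pairMem]
    | cons b t' =>
      simp only [List.cons_append] at ih ⊢
      rw [pairMem, ih, pairMem]
      simp only [List.getLastD_cons, ne_eq, not_false_eq_true, true_and,
        List.cons_ne_nil]
      tauto

-- the fold in port B, named for the invariant proof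
def stepB (g : Int) (p : PySem.Set Int × List Int) (x : Int) : PySem.Set Int × List Int :=
  if p.2 ≠ [] ∧ x - PySem.List.pyGetD p.2 (-1) 0 ≤ g then
    (p.1, p.2 ++ [x])
  else
    ((if 1 < p.2.length then p.2.foldl PySem.Set.add p.1 else p.1), [x])

lemma pyGetD_last (l : List Int) : PySem.List.pyGetD l (-1) 0 = l.getLastD 0 := by
  cases l with
  | nil => simp [PySem.List.pyGetD, PySem.List.pyGet?, PySem.List.pyIdx?]
  | cons a t =>
    rw [PySem.List.pyGetD_neg_one (a :: t) 0 (by simp), List.getLastD_eq_getLast?,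
      List.getLast?_eq_some_getLast (by simp)]
    rfl

lemma mem_finish_foldl (g x : Int) (l : List Int) (s : PySem.Set Int) (run : List Int)
    (hne : run ≠ []) (hch : chainLe g run) :
    (x ∈ (if 1 < (l.foldl (stepB g) (s, run)).2.length then
            (l.foldl (stepB g) (s, run)).2.foldl PySem.Set.add (l.foldl (stepB g) (s, run)).1
          else (l.foldl (stepB g) (s, run)).1)) ↔
      x ∈ s ∨ pairMem g x (run ++ l) := by
  induction l generalizing s run with
  | nil =>
    simp only [List.foldl_nil, List.append_nil]
    rw [chain_pairMem g x run hch]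
    split_ifs with hl
    · rw [mem_foldl_add]; tauto
    · have : ¬ (1 < run.length ∧ x ∈ run) := fun ⟨h1, _⟩ => hl h1
      tauto
  | cons y t ih =>
    simp only [List.foldl_cons]
    by_cases hcond : run ≠ [] ∧ y - PySem.List.pyGetD run (-1) 0 ≤ g
    · have hstep : stepB g (s, run) y = (s, run ++ [y]) := by
        unfold stepB; rw [if_pos hcond]
      rw [hstep, ih s (run ++ [y]) (by simp)
        (chain_append g y run hch (Or.inr (by rw [← pyGetD_last]; exact hcond.2)))]
      have : run ++ [y] ++ t = run ++ y :: t := by simp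
      rw [this]
    · have hgap : ¬ (y - run.getLastD 0 ≤ g) := by
        rw [← pyGetD_last]; intro h; exact hcond ⟨hne, h⟩
      have hstep : stepB g (s, run) y =
          ((if 1 < run.length then run.foldl PySem.Set.add s else s), [y]) := by
        unfold stepB; rw [if_neg hcond]
      rw [hstep, ih _ [y] (by simp) (by trivial)]
      rw [pairMem_append g x y run t]
      have hmem : x ∈ (if 1 < run.length then run.foldl PySem.Set.add s else s) ↔
          x ∈ s ∨ (1 < run.length ∧ x ∈ run) := by
        split_ifs with hl
        · rw [mem_foldl_add]; tauto
        · have : ¬ (1 < run.length ∧ x ∈ run) := fun ⟨h1, _⟩ => hl h1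
          tauto
      rw [hmem, chain_pairMem g x run hch]
      have : ¬ (run ≠ [] ∧ y - run.getLastD 0 ≤ g ∧ (x = run.getLastD 0 ∨ x = y)) := by
        rintro ⟨_, h2, _⟩; exact hgap h2
      tauto

lemma nodup_finish_foldl (g : Int) (l : List Int) (s : PySem.Set Int) (run : List Int)
    (hs : List.Nodup s) :
    List.Nodup (if 1 < (l.foldl (stepB g) (s, run)).2.length then
            (l.foldl (stepB g) (s, run)).2.foldl PySem.Set.add (l.foldl (stepB g) (s, run)).1
          else (l.foldl (stepB g) (s, run)).1) := by
  induction l generalizing s run with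
  | nil =>
    simp only [List.foldl_nil]
    split_ifs
    · exact nodup_foldl_add _ _ hs
    · exact hs
  | cons y t ih =>
    simp only [List.foldl_cons]
    by_cases hcond : run ≠ [] ∧ y - PySem.List.pyGetD run (-1) 0 ≤ g
    · rw [show stepB g (s, run) y = (s, run ++ [y]) from by unfold stepB; rw [if_pos hcond]]
      exact ih s (run ++ [y]) hs
    · rw [show stepB g (s, run) y =
          ((if 1 < run.length then run.foldl PySem.Set.add s else s), [y]) from by
        unfold stepB; rw [if_neg hcond]]
      exact ih _ [y] (by split_ifs with hl; exacts [nodup_foldl_add _ _ hs, hs])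

lemma mem_foldl_append_pairs (p : Int → Prop) [DecidablePred p] (a b : Int → Int)
    (l : List Int) (acc : List Int) (x : Int) :
    x ∈ l.foldl (fun acc i => if p i then (acc ++ [a i]) ++ [b i] else acc) acc ↔
      x ∈ acc ∨ ∃ i ∈ l, p i ∧ (x = a i ∨ x = b i) := by
  induction l generalizing acc with
  | nil => simp
  | cons hd tl ih =>
    simp only [List.foldl_cons, List.mem_cons]
    split_ifs with hp
    · rw [ih]; simp only [List.mem_append, List.mem_singleton]
      constructor
      · rintro (((h | rfl) | rfl) | ⟨i, hi, hpi, hx⟩)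
        · exact Or.inl h
        · exact Or.inr ⟨hd, Or.inl rfl, hp, Or.inl rfl⟩
        · exact Or.inr ⟨hd, Or.inl rfl, hp, Or.inr rfl⟩
        · exact Or.inr ⟨i, Or.inr hi, hpi, hx⟩
      · rintro (h | ⟨i, (rfl | hi), hpi, hx⟩)
        · exact Or.inl (Or.inl (Or.inl h))
        · rcases hx with rfl | rfl
          · exact Or.inl (Or.inl (Or.inr rfl))
          · exact Or.inl (Or.inr rfl)
        · exact Or.inr ⟨i, hi, hpi, hx⟩
    · rw [ih]
      constructor
      · rintro (h | ⟨i, hi, hpi, hx⟩)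
        · exact Or.inl h
        · exact Or.inr ⟨i, Or.inr hi, hpi, hx⟩
      · rintro (h | ⟨i, (rfl | hi), hpi, hx⟩)
        · exact Or.inl h
        · exact absurd hpi hp
        · exact Or.inr ⟨i, hi, hpi, hx⟩

-- A's indexed pair condition over r equals the structural pairMem
lemma index_pairMem (g x : Int) (r : List Int) :
    (∃ i : Int, (0 ≤ i ∧ i < (r.length : Int) - 1) ∧
        PySem.List.pyGetD r (i + 1) 0 - PySem.List.pyGetD r i 0 ≤ g ∧
        (x = PySem.List.pyGetD r i 0 ∨ x = PySem.List.pyGetD r (i + 1) 0)) ↔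
      pairMem g x r := by
  induction r with
  | nil =>
    simp only [pairMem, iff_false]
    rintro ⟨i, ⟨h0, h1⟩, _⟩; simp at h1; omega
  | cons a t ih =>
    cases t with
    | nil =>
      simp only [pairMem, iff_false]
      rintro ⟨i, ⟨h0, h1⟩, _⟩; simp at h1; omega
    | cons b t' =>
      have e0 : PySem.List.pyGetD (a :: b :: t') 0 0 = a := PySem.List.pyGetD_zero_cons a (b :: t') 0
      have e1 : PySem.List.pyGetD (a :: b :: t') (0 + 1) 0 = b := by
        rw [show (0 : Int) + 1 = ((1 : Nat) : Int) by norm_num, PySem.List.pyGetD_natCast]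
        rfl
      have eshift : ∀ k : Nat, PySem.List.pyGetD (a :: b :: t') ((k : Int) + 1) 0 =
          PySem.List.pyGetD (b :: t') (k : Int) 0 := by
        intro k
        rw [show (k : Int) + 1 = (((k + 1 : Nat)) : Int) by push_cast; ring,
          PySem.List.pyGetD_natCast, PySem.List.pyGetD_natCast]
        simp
      rw [pairMem, ← ih]
      constructor
      · rintro ⟨i, ⟨h0, h1⟩, hg, hx⟩
        by_cases hiz : i = 0
        · subst hiz
          rw [e0, e1] at hg hx
          exact Or.inl ⟨by omega, hx⟩
        · obtain ⟨k, rfl⟩ : ∃ k : Nat, i = (k : Int) + 1 := ⟨(i - 1).toNat, by omega⟩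
          right
          refine ⟨(k : Int), ⟨by positivity, by simp at h1 ⊢; omega⟩, ?_⟩
          have e2 := eshift (k + 1)
          rw [show (((k + 1 : Nat)) : Int) + 1 = (k : Int) + 1 + 1 by push_cast; ring,
            show (((k + 1 : Nat)) : Int) = (k : Int) + 1 by push_cast; ring] at e2
          rw [e2, eshift k] at hg hx
          exact ⟨hg, hx⟩
      · rintro (⟨hg, hx⟩ | ⟨i, ⟨h0, h1⟩, hg, hx⟩)
        · refine ⟨0, ⟨le_refl _, by simp⟩, ?_⟩
          rw [e0, e1]
          exact ⟨by omega, hx⟩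
        · obtain ⟨k, rfl⟩ : ∃ k : Nat, i = (k : Int) := ⟨i.toNat, by omega⟩
          refine ⟨(k : Int) + 1, ⟨by positivity, by simp at h1 ⊢; omega⟩, ?_⟩
          have e2 := eshift (k + 1)
          rw [show (((k + 1 : Nat)) : Int) + 1 = (k : Int) + 1 + 1 by push_cast; ring,
            show (((k + 1 : Nat)) : Int) = (k : Int) + 1 by push_cast; ring] at e2
          rw [e2, eshift k]
          exact ⟨hg, hx⟩

lemma core_equiv (r : List Int) (g : Int) :
    PySem.List.sorted (PySem.Set.ofList
      ((PySem.List.pyRange 0 ((r.length : Int) - 1) 1).foldl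
        (fun acc i =>
          if PySem.List.pyGetD r (i + 1) 0 - PySem.List.pyGetD r i 0 ≤ g then
            (acc ++ [PySem.List.pyGetD r i 0]) ++ [PySem.List.pyGetD r (i + 1) 0]
          else acc) [])) (fun x => x) false =
    PySem.List.sorted
      (if 1 < (r.foldl (stepB g) (PySem.Set.empty, [])).2.length then
        (r.foldl (stepB g) (PySem.Set.empty, [])).2.foldl PySem.Set.add
          (r.foldl (stepB g) (PySem.Set.empty, [])).1
      else (r.foldl (stepB g) (PySem.Set.empty, [])).1) (fun x => x) false := by
  apply PySem.List.sorted_eq_sorted_of_perm _ _ _ (fun _ _ h => h)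
  rw [List.perm_ext_iff_of_nodup (PySem.Set.nodup_ofList _)
    (nodup_finish_foldl g r PySem.Set.empty [] (by simp [PySem.Set.empty]))]
  intro x
  rw [PySem.Set.mem_ofList,
    mem_foldl_append_pairs (fun i => PySem.List.pyGetD r (i + 1) 0 - PySem.List.pyGetD r i 0 ≤ g)
      (fun i => PySem.List.pyGetD r i 0) (fun i => PySem.List.pyGetD r (i + 1) 0)]
  simp only [List.not_mem_nil, false_or, PySem.List.mem_pyRange_one]
  rw [index_pairMem g x r]
  cases r with
  | nil => simp [pairMem, PySem.Set.empty]
  | cons a t =>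
    have hstep0 : stepB g (PySem.Set.empty, ([] : List Int)) a = (PySem.Set.empty, [a]) := by
      unfold stepB; simp
    simp only [List.foldl_cons, hstep0]
    rw [mem_finish_foldl g x t PySem.Set.empty [a] (by simp) (by trivial)]
    simp [PySem.Set.empty]

-- ===== VERDICT =====
theorem remove_lines_with_large_gap_right_spec : Claim_equal_remove_lines_with_large_gap_right := by
  intro vertical_lines gap_threshold _
  unfold Spec_remove_lines_with_large_gap_right
  unfold remove_lines_with_large_gap_right remove_lines_with_large_gap_right_alt
  exact core_equiv (PySem.List.slice vertical_lines (some (-6)) none) gap_threshold
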